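-- pv_equiv track=rewrite | github.com/Thomaw/Project-Euler | 600-700/698.py | gogo_find
-- ===== SOURCE A (Python) =====
-- def fac(x):
-- 	ret = 1
-- 	for i in range(1, x+1):
-- 		ret = ret * i
-- 	return ret
--
-- def gogo_find(X, x, num, num_1, num_2, num_3):
-- 	if x == 0:
-- 		return 0
-- 	ret = 0
-- 	L = [0, 1, 2, 3, 11, 12, 13, 21, 22, 23, 31, 32, 33]
-- 	## start with 1
-- 	for i in L:
-- 		for j in L:
-- 			for k in L:
-- 				if i >= num_1 + 1 and j >= num_2 and k >= num_3 and i + j + k == X: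
-- 					ret += fac(x-1) // fac(i-num_1-1) // fac(j-num_2) // fac(k-num_3)
-- 	if ret >= num:
-- 		ans = 10 ** (x-1)
-- 		ans += gogo_find(X, x-1, num, num_1+1, num_2, num_3)
-- 		return ans
-- 	pret = ret
-- 	## start with 2
-- 	for i in L:
-- 		for j in L:
-- 			for k in L:
-- 				if i >= num_1 and j >= num_2 + 1 and k >= num_3 and i + j + k == X:
-- 					ret += fac(x-1) // fac(i-num_1) // fac(j-num_2-1) // fac(k-num_3)
-- 	if ret >= num:
-- 		ans = 2 * (10 ** (x-1))
-- 		ans += gogo_find(X, x-1, num-pret, num_1, num_2+1, num_3)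
-- 		return ans
-- 	## start with 3
-- 	pret = ret
-- 	ans = 3 * (10 ** (x-1))
-- 	ans += gogo_find(X, x-1, num-pret, num_1, num_2, num_3+1)
-- 	return ans
-- ===== SOURCE B (Python) =====
-- def fac(x):
--     ret = 1
--     for i in range(1, x + 1):
--         ret = ret * i
--     return ret
--
--
-- L = (0, 1, 2, 3, 11, 12, 13, 21, 22, 23, 31, 32, 33)
--
--
-- def count(X, x, a, b, c):
--     # weighted completions of length x-1: the third index k is derived as
--     # X - i - j and membership-tested, instead of a third nested scan over L
--     total = 0
--     for i in L:
--         if i < a: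
--             continue
--         for j in L:
--             if j < b:
--                 continue
--             k = X - i - j
--             if k in L and k >= c:
--                 total += fac(x - 1) // fac(i - a) // fac(j - b) // fac(k - c)
--     return total
--
--
-- def gogo_find(X, x, num, num_1, num_2, num_3):
--     ans = 0
--     while x > 0:
--         r1 = count(X, x, num_1 + 1, num_2, num_3)
--         if r1 >= num:
--             ans += 10 ** (x - 1)
--             num_1 += 1
--         else:
--             r2 = r1 + count(X, x, num_1, num_2 + 1, num_3)
--             if r2 >= num:
--                 ans += 2 * 10 ** (x - 1)
--                 num -= r1
--                 num_2 += 1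
--             else:
--                 ans += 3 * 10 ** (x - 1)
--                 num -= r2
--                 num_3 += 1
--         x -= 1
--     return ans
-- ===== Notes on version B (the rewrite author's own statement) =====
-- stated objective: alternative
-- what changed: Replaces A's recursion by an iterative while-loop that accumulates the answer digit by digit, and replaces the innermost of the three nested scans over L by deriving k = X - i - j and membership-testing it, with the two branch sums unified into one generic count(a, b, c) helper.
import Mathlib
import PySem

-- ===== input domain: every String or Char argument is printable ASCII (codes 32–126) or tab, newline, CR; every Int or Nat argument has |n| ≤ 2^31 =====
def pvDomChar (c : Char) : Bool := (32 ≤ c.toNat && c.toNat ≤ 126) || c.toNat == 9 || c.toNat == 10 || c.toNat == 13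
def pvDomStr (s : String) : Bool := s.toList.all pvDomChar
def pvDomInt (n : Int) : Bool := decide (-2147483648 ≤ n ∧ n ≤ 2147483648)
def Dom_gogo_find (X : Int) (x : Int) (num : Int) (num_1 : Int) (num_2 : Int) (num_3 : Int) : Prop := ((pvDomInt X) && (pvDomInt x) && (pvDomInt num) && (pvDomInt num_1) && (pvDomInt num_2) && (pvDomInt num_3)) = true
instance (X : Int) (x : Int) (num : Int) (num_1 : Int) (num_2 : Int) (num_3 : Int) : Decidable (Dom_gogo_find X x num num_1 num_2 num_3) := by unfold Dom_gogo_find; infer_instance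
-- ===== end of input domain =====

-- B replaces A's recursion by an iterative digit-by-digit loop and derives the third
-- loop index k as X - i - j (membership test) instead of a third nested scan (objective: alternative).

-- ===== PORT A =====

-- fac(x): product over range(1, x+1)
def pyfac (n : Int) : Int := (PySem.List.pyRange 1 (n + 1) 1).foldl (fun r i => r * i) 1

-- the list L both versions use
def Lconst : List Int := [0, 1, 2, 3, 11, 12, 13, 21, 22, 23, 31, 32, 33]

-- A's first triple loop ("start with 1"), accumulating into acc
def gogoLoop1 (X : Int) (x : Int) (num_1 : Int) (num_2 : Int) (num_3 : Int) (acc : Int) : Int :=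
  Lconst.foldl (fun r i =>
    Lconst.foldl (fun r j =>
      Lconst.foldl (fun r k =>
        if i ≥ num_1 + 1 ∧ j ≥ num_2 ∧ k ≥ num_3 ∧ i + j + k = X then
          r + PySem.Int.floordiv (PySem.Int.floordiv (PySem.Int.floordiv (pyfac (x - 1)) (pyfac (i - num_1 - 1))) (pyfac (j - num_2))) (pyfac (k - num_3))
        else r) r) r) acc

-- A's second triple loop ("start with 2"), accumulating into acc
def gogoLoop2 (X : Int) (x : Int) (num_1 : Int) (num_2 : Int) (num_3 : Int) (acc : Int) : Int :=
  Lconst.foldl (fun r i =>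
    Lconst.foldl (fun r j =>
      Lconst.foldl (fun r k =>
        if i ≥ num_1 ∧ j ≥ num_2 + 1 ∧ k ≥ num_3 ∧ i + j + k = X then
          r + PySem.Int.floordiv (PySem.Int.floordiv (PySem.Int.floordiv (pyfac (x - 1)) (pyfac (i - num_1))) (pyfac (j - num_2 - 1))) (pyfac (k - num_3))
        else r) r) r) acc

-- the guard `x ≤ 0` makes the recursion total: Python returns 0 at x = 0 and
-- recurses without bound for x < 0 (excluded by Pre_gogo_find)
def gogo_find (X : Int) (x : Int) (num : Int) (num_1 : Int) (num_2 : Int) (num_3 : Int) : Int :=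
  if _h : x ≤ 0 then 0
  else
    let ret := gogoLoop1 X x num_1 num_2 num_3 0
    if ret ≥ num then 10 ^ (x - 1).toNat + gogo_find X (x - 1) num (num_1 + 1) num_2 num_3
    else
      let ret2 := gogoLoop2 X x num_1 num_2 num_3 ret
      if ret2 ≥ num then 2 * 10 ^ (x - 1).toNat + gogo_find X (x - 1) (num - ret) num_1 (num_2 + 1) num_3
      else 3 * 10 ^ (x - 1).toNat + gogo_find X (x - 1) (num - ret2) num_1 num_2 (num_3 + 1)
termination_by x.toNat
decreasing_by all_goals omega

-- ===== PORT B =====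

-- B's count(X, x, a, b, c): double loop, k derived as X - i - j
def cnt (X : Int) (x : Int) (a : Int) (b : Int) (c : Int) : Int :=
  Lconst.foldl (fun r i =>
    if i < a then r
    else
      Lconst.foldl (fun r j =>
        if j < b then r
        else
          let k := X - i - j
          if k ∈ Lconst ∧ k ≥ c then
            r + PySem.Int.floordiv (PySem.Int.floordiv (PySem.Int.floordiv (pyfac (x - 1)) (pyfac (i - a))) (pyfac (j - b))) (pyfac (k - c))
          else r) r) 0

-- B's while loop, with accumulator ans
def altLoop (X : Int) (x : Int) (num : Int) (num_1 : Int) (num_2 : Int) (num_3 : Int) (ans : Int) : Int :=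
  if _h : x ≤ 0 then ans
  else
    let r1 := cnt X x (num_1 + 1) num_2 num_3
    if r1 ≥ num then altLoop X (x - 1) num (num_1 + 1) num_2 num_3 (ans + 10 ^ (x - 1).toNat)
    else
      let r2 := r1 + cnt X x num_1 (num_2 + 1) num_3
      if r2 ≥ num then altLoop X (x - 1) (num - r1) num_1 (num_2 + 1) num_3 (ans + 2 * 10 ^ (x - 1).toNat)
      else altLoop X (x - 1) (num - r2) num_1 num_2 (num_3 + 1) (ans + 3 * 10 ^ (x - 1).toNat)
termination_by x.toNat
decreasing_by all_goals omega

def gogo_find_alt (X : Int) (x : Int) (num : Int) (num_1 : Int) (num_2 : Int) (num_3 : Int) : Int :=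
  altLoop X x num num_1 num_2 num_3 0

-- ===== PRECONDITION & SPEC =====
-- Pre_ excludes x < 0, on which Python A recurses without bound (RecursionError).
def Pre_gogo_find (X : Int) (x : Int) (num : Int) (num_1 : Int) (num_2 : Int) (num_3 : Int) : Prop := 0 ≤ x
instance (X : Int) (x : Int) (num : Int) (num_1 : Int) (num_2 : Int) (num_3 : Int) : Decidable (Pre_gogo_find X x num num_1 num_2 num_3) := by unfold Pre_gogo_find; infer_instance

def pvWitness_gogo_find : Int × Int × Int × Int × Int × Int := (9, 3, 5, 0, 0, 0)

def Spec_gogo_find (X : Int) (x : Int) (num : Int) (num_1 : Int) (num_2 : Int) (num_3 : Int) (out : Int) : Prop := out = gogo_find_alt X x num num_1 num_2 num_3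
instance (X : Int) (x : Int) (num : Int) (num_1 : Int) (num_2 : Int) (num_3 : Int) (out : Int) : Decidable (Spec_gogo_find X x num num_1 num_2 num_3 out) := by unfold Spec_gogo_find; infer_instance

-- ===== CLAIM (what is proved, stated in full; the proofs are below) =====
def Claim_equal_gogo_find : Prop := ∀ (X : Int) (x : Int) (num : Int) (num_1 : Int) (num_2 : Int) (num_3 : Int), Dom_gogo_find X x num num_1 num_2 num_3 → Pre_gogo_find X x num num_1 num_2 num_3 → Spec_gogo_find X x num num_1 num_2 num_3 (gogo_find X x num num_1 num_2 num_3)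

-- ===== LEMMAS AND PROOFS =====

-- a fold whose step never fires returns its accumulator
theorem pvFoldlId (f : Int → Int → Int) (h : ∀ r y, f r y = r) :
    ∀ (l : List Int) (a : Int), l.foldl f a = a := by
  intro l
  induction l with
  | nil => intro a; rfl
  | cons y l ih => intro a; simp only [List.foldl_cons, h]; exact ih a

-- two folds with pointwise-equal steps agree
theorem pvFoldlCongr (f g : Int → Int → Int) (h : ∀ r y, f r y = g r y)
    (l : List Int) (a : Int) : l.foldl f a = l.foldl g a := by
  have : f = g := funext fun r => funext fun y => h r y
  rw [this]

-- a fold that only ever adds to its accumulator shifts over the start value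
theorem pvFoldlShift (f : Int → Int → Int) (h : ∀ r y, f r y = r + f 0 y) :
    ∀ (l : List Int) (a : Int), l.foldl f a = a + l.foldl f 0 := by
  intro l
  induction l with
  | nil => intro a; simp
  | cons y l ih =>
      intro a
      simp only [List.foldl_cons]
      rw [ih (f a y), ih (f 0 y), h a y]
      ring

-- over a duplicate-free list, a fold guarded by `k = t` picks out at most one element
theorem pvFoldlPick (t : Int) (q : Int → Prop) [DecidablePred q] (T : Int → Int) :
    ∀ (l : List Int), l.Nodup → ∀ (r : Int),
      l.foldl (fun r k => if k = t ∧ q k then r + T k else r) r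
        = if t ∈ l ∧ q t then r + T t else r := by
  intro l
  induction l with
  | nil => intro _ r; simp
  | cons y l ih =>
      intro hnd r
      rcases List.nodup_cons.mp hnd with ⟨hy, hnd'⟩
      simp only [List.foldl_cons]
      rw [ih hnd']
      by_cases hyt : y = t
      · subst hyt
        by_cases hq : q y
        · simp [hy, hq]
        · simp [hy, hq]
      · have hty : ¬ t = y := fun h => hyt h.symm
        have hne : (y = t ∧ q y) = False := by simp [hyt]
        simp only [hne, if_false]
        by_cases hm : t ∈ l <;> by_cases hq : q t <;> simp [hm, hq, hty]

theorem pvNodupL : Lconst.Nodup := by decide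

-- A's first triple loop equals acc + B's count with a = num_1 + 1
theorem pvLoop1Eq (X x num_1 num_2 num_3 acc : Int) :
    gogoLoop1 X x num_1 num_2 num_3 acc = acc + cnt X x (num_1 + 1) num_2 num_3 := by
  unfold gogoLoop1 cnt
  have hstep : ∀ (r i : Int),
      (Lconst.foldl (fun r j =>
        Lconst.foldl (fun r k =>
          if i ≥ num_1 + 1 ∧ j ≥ num_2 ∧ k ≥ num_3 ∧ i + j + k = X then
            r + PySem.Int.floordiv (PySem.Int.floordiv (PySem.Int.floordiv (pyfac (x - 1)) (pyfac (i - num_1 - 1))) (pyfac (j - num_2))) (pyfac (k - num_3))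
          else r) r) r)
      = (if i < num_1 + 1 then r
         else Lconst.foldl (fun r j =>
           if j < num_2 then r
           else
             let k := X - i - j
             if k ∈ Lconst ∧ k ≥ num_3 then
               r + PySem.Int.floordiv (PySem.Int.floordiv (PySem.Int.floordiv (pyfac (x - 1)) (pyfac (i - (num_1 + 1)))) (pyfac (j - num_2))) (pyfac (k - num_3))
             else r) r) := by
    intro r i
    by_cases hi : i < num_1 + 1
    · rw [if_pos hi]
      refine pvFoldlId _ (fun r j => ?_) Lconst r
      refine pvFoldlId _ (fun r k => ?_) Lconst r
      rw [if_neg]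
      rintro ⟨h1, _⟩; omega
    · rw [if_neg hi]
      refine pvFoldlCongr _ _ (fun r j => ?_) Lconst r
      by_cases hj : j < num_2
      · rw [if_pos hj]
        refine pvFoldlId _ (fun r k => ?_) Lconst r
        rw [if_neg]
        rintro ⟨_, h2, _⟩; omega
      · rw [if_neg hj]
        have hcond : ∀ k : Int,
            (i ≥ num_1 + 1 ∧ j ≥ num_2 ∧ k ≥ num_3 ∧ i + j + k = X)
              = (k = X - i - j ∧ k ≥ num_3) := by
          intro k; apply propext; omega
        simp only [hcond]
        rw [pvFoldlPick (X - i - j) (fun k => k ≥ num_3) _ Lconst pvNodupL r]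
        have harg : i - (num_1 + 1) = i - num_1 - 1 := by ring
        simp only [harg]
    -- the two step functions agree pointwise, so the outer folds agree
  rw [pvFoldlCongr _ _ hstep Lconst acc]
  exact pvFoldlShift _ (by
    intro r i
    by_cases hi : i < num_1 + 1
    · simp only [if_pos hi]; ring
    · simp only [if_neg hi]
      exact pvFoldlShift _ (by
        intro r j
        by_cases hj : j < num_2
        · simp only [if_pos hj]; ring
        · simp only [if_neg hj]
          by_cases hk : (X - i - j) ∈ Lconst ∧ (X - i - j) ≥ num_3
          · simp only [hk, and_self, if_true, ite_true]; ring
          · simp only [hk, if_false, ite_false]; ring) Lconst r) Lconst acc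

-- A's second triple loop equals acc + B's count with b = num_2 + 1
theorem pvLoop2Eq (X x num_1 num_2 num_3 acc : Int) :
    gogoLoop2 X x num_1 num_2 num_3 acc = acc + cnt X x num_1 (num_2 + 1) num_3 := by
  unfold gogoLoop2 cnt
  have hstep : ∀ (r i : Int),
      (Lconst.foldl (fun r j =>
        Lconst.foldl (fun r k =>
          if i ≥ num_1 ∧ j ≥ num_2 + 1 ∧ k ≥ num_3 ∧ i + j + k = X then
            r + PySem.Int.floordiv (PySem.Int.floordiv (PySem.Int.floordiv (pyfac (x - 1)) (pyfac (i - num_1))) (pyfac (j - num_2 - 1))) (pyfac (k - num_3))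
          else r) r) r)
      = (if i < num_1 then r
         else Lconst.foldl (fun r j =>
           if j < num_2 + 1 then r
           else
             let k := X - i - j
             if k ∈ Lconst ∧ k ≥ num_3 then
               r + PySem.Int.floordiv (PySem.Int.floordiv (PySem.Int.floordiv (pyfac (x - 1)) (pyfac (i - num_1))) (pyfac (j - (num_2 + 1)))) (pyfac (k - num_3))
             else r) r) := by
    intro r i
    by_cases hi : i < num_1
    · rw [if_pos hi]
      refine pvFoldlId _ (fun r j => ?_) Lconst r
      refine pvFoldlId _ (fun r k => ?_) Lconst r
      rw [if_neg]
      rintro ⟨h1, _⟩; omega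
    · rw [if_neg hi]
      refine pvFoldlCongr _ _ (fun r j => ?_) Lconst r
      by_cases hj : j < num_2 + 1
      · rw [if_pos hj]
        refine pvFoldlId _ (fun r k => ?_) Lconst r
        rw [if_neg]
        rintro ⟨_, h2, _⟩; omega
      · rw [if_neg hj]
        have hcond : ∀ k : Int,
            (i ≥ num_1 ∧ j ≥ num_2 + 1 ∧ k ≥ num_3 ∧ i + j + k = X)
              = (k = X - i - j ∧ k ≥ num_3) := by
          intro k; apply propext; omega
        simp only [hcond]
        rw [pvFoldlPick (X - i - j) (fun k => k ≥ num_3) _ Lconst pvNodupL r]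
        have harg : j - (num_2 + 1) = j - num_2 - 1 := by ring
        simp only [harg]
  rw [pvFoldlCongr _ _ hstep Lconst acc]
  exact pvFoldlShift _ (by
    intro r i
    by_cases hi : i < num_1
    · simp only [if_pos hi]; ring
    · simp only [if_neg hi]
      exact pvFoldlShift _ (by
        intro r j
        by_cases hj : j < num_2 + 1
        · simp only [if_pos hj]; ring
        · simp only [if_neg hj]
          by_cases hk : (X - i - j) ∈ Lconst ∧ (X - i - j) ≥ num_3
          · simp only [hk, and_self, if_true, ite_true]; ring
          · simp only [hk, if_false, ite_false]; ring) Lconst r) Lconst acc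

-- B's loop with accumulator ans equals ans + A's recursion
theorem pvMain : ∀ (n : Nat) (X x num num_1 num_2 num_3 ans : Int), x.toNat = n →
    altLoop X x num num_1 num_2 num_3 ans = ans + gogo_find X x num num_1 num_2 num_3 := by
  intro n
  induction n with
  | zero =>
      intro X x num num_1 num_2 num_3 ans h
      have hx : x ≤ 0 := by omega
      rw [altLoop, gogo_find, dif_pos hx, dif_pos hx]
      ring
  | succ m ih =>
      intro X x num num_1 num_2 num_3 ans h
      have hx : ¬ x ≤ 0 := by omega
      have hx' : (x - 1).toNat = m := by omega
      rw [altLoop, gogo_find, dif_neg hx, dif_neg hx]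
      simp only [pvLoop1Eq, pvLoop2Eq, zero_add]
      split_ifs with h1 h2
      · rw [ih _ _ _ _ _ _ _ hx']; ring
      · rw [ih _ _ _ _ _ _ _ hx']; ring
      · rw [ih _ _ _ _ _ _ _ hx']; ring

-- ===== VERDICT (by name: the statement is the Claim_ definition above) =====
theorem gogo_find_spec : Claim_equal_gogo_find := by
  intro X x num num_1 num_2 num_3 _hDom _hPre
  unfold Spec_gogo_find gogo_find_alt
  rw [pvMain x.toNat X x num num_1 num_2 num_3 0 rfl]
  ring
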